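-- pv_equiv track=rewrite | github.com/threefoldtech/js-ng | jumpscale/data/bcdb/models/schema_model.py | _valid_url
-- ===== SOURCE A (Python) =====
-- def _valid_url(schema_url):
--     if not schema_url[0].isalnum() or not schema_url[-1].isalnum():
--         return False
--     for i in range(len(schema_url)):
--         if i and schema_url[i] == schema_url[i - 1] and schema_url[i] == '.':
--             return False
--         if not schema_url[i].isalnum() and schema_url[i] != '.':
--             return False
--     return True
-- ===== SOURCE B (Python) =====
-- def _valid_url(schema_url):
--     # Tokenise on '.' and demand every dot-separated token be a nonempty
--     # alphanumeric word: empty tokens arise exactly from leading/trailing or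
--     # consecutive dots, and a non-alnum token contains an invalid character.
--     return all(part.isalnum() for part in schema_url.split('.'))
-- ===== Notes on version B (the rewrite author's own statement) =====
-- stated objective: simpler
-- what changed: A's fused index loop over characters with adjacent-position comparisons and endpoint guards is replaced by tokenisation: split the string on the dot separator and require every token to be a nonempty alphanumeric word, which subsumes the endpoint, consecutive-dot and character-validity checks at once.
-- crash fix: On the empty string A raises IndexError at schema_url[0]; B returns False (the empty string is not a valid URL). — e.g. on _valid_url(""): A raises IndexError, B returns false
import Mathlib
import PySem

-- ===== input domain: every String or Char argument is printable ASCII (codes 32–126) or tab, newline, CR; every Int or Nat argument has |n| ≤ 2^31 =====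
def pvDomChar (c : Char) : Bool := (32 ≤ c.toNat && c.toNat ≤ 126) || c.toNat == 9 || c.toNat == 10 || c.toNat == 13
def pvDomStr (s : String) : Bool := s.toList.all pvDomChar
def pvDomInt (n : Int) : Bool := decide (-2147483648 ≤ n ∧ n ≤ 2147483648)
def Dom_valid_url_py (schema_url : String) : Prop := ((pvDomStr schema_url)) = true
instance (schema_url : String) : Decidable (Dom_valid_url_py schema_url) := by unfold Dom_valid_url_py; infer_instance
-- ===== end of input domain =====

-- B replaces A's fused per-index loop (endpoint guards + adjacent-character comparisons) by
-- tokenisation: split on the dot separator and require every token to be a nonempty alphanumeric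
-- word (simpler; a timing run measured it faster via C-level str.split/str.isalnum).


-- ===== PORT A =====
-- A's fused 'for i in range(len(schema_url))' loop with its two early returns.
def loopA_valid_url (cs : List Char) : List Int → Bool
  | [] => true
  | i :: rest =>
    if (i != 0) && (PySem.List.pyGetD cs i ' ' == PySem.List.pyGetD cs (i-1) ' ')
        && (PySem.List.pyGetD cs i ' ' == '.') then false
    else if !(PySem.Chars.isalnum (PySem.List.pyGetD cs i ' '))
        && (PySem.List.pyGetD cs i ' ' != '.') then false
    else loopA_valid_url cs rest

def valid_url_py (schema_url : String) : Bool :=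
  if !(PySem.Chars.isalnum (PySem.List.pyGetD schema_url.toList 0 ' '))
      || !(PySem.Chars.isalnum (PySem.List.pyGetD schema_url.toList (-1) ' ')) then false
  else loopA_valid_url schema_url.toList
    (PySem.List.pyRange 0 (schema_url.toList.length : Int) 1)

-- ===== PORT B =====
-- schema_url.split('.') with the literal (nonempty) separator '.' is PySem.Chars.splitOn (exact);
-- part.isalnum() is PySem.Chars.strIsalnum.
def valid_url_py_alt (schema_url : String) : Bool :=
  (PySem.Chars.splitOn schema_url.toList ['.']).all (fun part => PySem.Chars.strIsalnum part)

-- ===== PRECONDITION & SPEC =====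
-- Pre_ excludes only the empty string, on which A raises IndexError at schema_url[0].
def Pre_valid_url_py (schema_url : String) : Prop := schema_url ≠ ""
instance (schema_url : String) : Decidable (Pre_valid_url_py schema_url) := by unfold Pre_valid_url_py; infer_instance
def pvWitness_valid_url_py : String := ("a.b")

-- On the empty string A raises IndexError at schema_url[0]; B returns False.
def Raises_valid_url_py (schema_url : String) : Prop := schema_url = ""
instance (schema_url : String) : Decidable (Raises_valid_url_py schema_url) := by unfold Raises_valid_url_py; infer_instance
def pvRaiseWitness_valid_url_py : String := ("")
def pvRaiseWitnessOut_valid_url_py : Bool := false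

def Spec_valid_url_py (schema_url : String) (out : Bool) : Prop := out = valid_url_py_alt schema_url
instance (schema_url : String) (out : Bool) : Decidable (Spec_valid_url_py schema_url out) := by unfold Spec_valid_url_py; infer_instance

-- ===== CLAIM (what is proved, stated in full; the proofs are below) =====
def Claim_equal_valid_url_py : Prop := ∀ (schema_url : String), Dom_valid_url_py schema_url → Pre_valid_url_py schema_url → Spec_valid_url_py schema_url (valid_url_py schema_url)
def Claim_raises_valid_url_py : Prop := (∀ (schema_url : String), Dom_valid_url_py schema_url → Raises_valid_url_py schema_url → ¬ Pre_valid_url_py schema_url) ∧ (Dom_valid_url_py (pvRaiseWitness_valid_url_py) ∧ Raises_valid_url_py (pvRaiseWitness_valid_url_py) ∧ valid_url_py_alt (pvRaiseWitness_valid_url_py) = pvRaiseWitnessOut_valid_url_py)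

-- ===== LEMMAS AND PROOFS =====

-- A's loop is an 'all' over the visited indices (the two early returns commute for a Bool result).
theorem loopA_eq_all (cs : List Char) (l : List Int) :
    loopA_valid_url cs l
      = l.all (fun i =>
          !((i != 0) && (PySem.List.pyGetD cs i ' ' == PySem.List.pyGetD cs (i-1) ' ')
              && (PySem.List.pyGetD cs i ' ' == '.'))
          && !(!(PySem.Chars.isalnum (PySem.List.pyGetD cs i ' '))
              && (PySem.List.pyGetD cs i ' ' != '.'))) := by
  induction l with
  | nil => rfl
  | cons i rest ih =>
    simp only [loopA_valid_url, List.all_cons, ih]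
    cases hb : ((i != 0) && (PySem.List.pyGetD cs i ' ' == PySem.List.pyGetD cs (i-1) ' ')
        && (PySem.List.pyGetD cs i ' ' == '.')) <;>
      cases hc : (!(PySem.Chars.isalnum (PySem.List.pyGetD cs i ' '))
        && (PySem.List.pyGetD cs i ' ' != '.')) <;>
      simp_all

theorem prefix_two_iff {α : Type} (a b : α) (t : List α) :
    [a, b] <+: t ↔ ∃ u, t = a :: b :: u := by
  constructor
  · rintro ⟨u, hu⟩; exact ⟨u, hu.symm⟩
  · rintro ⟨u, rfl⟩; exact ⟨u, rfl⟩

theorem infix_dots_iff (cs : List Char) :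
    PySem.Chars.isIn ['.', '.'] cs = true
      ↔ ∃ k, ∃ _ : k + 1 < cs.length, cs[k] = '.' ∧ cs[k+1] = '.' := by
  rw [← PySem.Chars.exists_prefix_drop_iff_isIn]
  constructor
  · rintro ⟨j, hp⟩
    obtain ⟨u, hu⟩ := (prefix_two_iff _ _ _).1 hp
    have h0 : cs[j + 0]? = some '.' := by rw [← List.getElem?_drop, hu]; rfl
    have h1 : cs[j + 1]? = some '.' := by rw [← List.getElem?_drop, hu]; rfl
    rw [Nat.add_zero] at h0
    obtain ⟨hlt1, he1⟩ := List.getElem?_eq_some_iff.1 h1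
    obtain ⟨hlt0, he0⟩ := List.getElem?_eq_some_iff.1 h0
    exact ⟨j, hlt1, he0, he1⟩
  · rintro ⟨k, hk, h0, h1⟩
    refine ⟨k, (prefix_two_iff _ _ _).2 ⟨cs.drop (k+2), ?_⟩⟩
    rw [List.drop_eq_getElem_cons (by omega), List.drop_eq_getElem_cons hk, h0, h1]

-- The characterisation of A's whole-range loop: no-".."-infix AND all chars valid.
theorem loop_range_eq (cs : List Char) :
    loopA_valid_url cs (PySem.List.pyRange 0 (cs.length : Int) 1)
      = (!(PySem.Chars.isIn ['.', '.'] cs)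
          && cs.all (fun c => PySem.Chars.isalnum c || c == '.')) := by
  rw [loopA_eq_all]
  cases hI : PySem.Chars.isIn ['.', '.'] cs with
  | true =>
    simp only [Bool.not_true, Bool.false_and]
    rw [List.all_eq_false]
    obtain ⟨k, hk, h0, h1⟩ := (infix_dots_iff cs).1 hI
    refine ⟨((k+1 : Nat) : Int), ?_, ?_⟩
    · rw [PySem.List.pyRange_zero_natCast]
      exact List.mem_map.2 ⟨k+1, List.mem_range.2 hk, rfl⟩
    · have e1 : PySem.List.pyGetD cs ((k+1 : Nat) : Int) ' ' = cs[k+1] := by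
        rw [PySem.List.pyGetD_eq_getElem _ _ (by omega) (by simp; omega)]
        simp
      have e0 : PySem.List.pyGetD cs (((k+1 : Nat) : Int) - 1) ' ' = cs[k] := by
        have h : ((k+1 : Nat) : Int) - 1 = ((k : Nat) : Int) := by push_cast; ring
        rw [h, PySem.List.pyGetD_eq_getElem _ _ (by omega) (by simp; omega)]
        simp
      have hne : ¬ ((k+1 : Nat) : Int) = 0 := by omega
      simp only [e1, e0, h0, h1]
      simp
      omega
  | false =>
    cases hA : cs.all (fun c => PySem.Chars.isalnum c || c == '.') with
    | false =>
      simp only [Bool.not_false, Bool.true_and]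
      rw [List.all_eq_false]
      obtain ⟨c, hc, hv⟩ := List.all_eq_false.1 hA
      obtain ⟨k, hk, hck⟩ := List.mem_iff_getElem.1 hc
      refine ⟨((k : Nat) : Int), ?_, ?_⟩
      · rw [PySem.List.pyRange_zero_natCast]
        exact List.mem_map.2 ⟨k, List.mem_range.2 hk, rfl⟩
      · have e : PySem.List.pyGetD cs ((k : Nat) : Int) ' ' = cs[k] := by
          rw [PySem.List.pyGetD_eq_getElem _ _ (by omega) (by simp; omega)]
          simp
        subst hck
        simp only [Bool.not_eq_true, Bool.or_eq_false_iff] at hv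
        simp only [e]
        simp [hv.1, show ¬ cs[k] = '.' by simpa using hv.2]
    | true =>
      simp only [Bool.not_false, Bool.true_and]
      have hall := List.all_eq_true.1 hA
      have hdots : ¬ PySem.Chars.isIn ['.', '.'] cs = true := by simp [hI]
      rw [List.all_eq_true]
      intro i hi
      rw [PySem.List.pyRange_zero_natCast] at hi
      obtain ⟨k, hk, rfl⟩ := List.mem_map.1 hi
      have hk' := List.mem_range.1 hk
      have e : PySem.List.pyGetD cs ((k : Nat) : Int) ' ' = cs[k] := by
        rw [PySem.List.pyGetD_eq_getElem _ _ (by omega) (by simp; omega)]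
        simp
      have hvk := hall cs[k] (List.getElem_mem hk')
      rcases Nat.eq_zero_or_pos k with rfl | hkpos
      · rw [Nat.cast_zero] at e
        simp [e]
        simpa using hvk
      · have e0 : PySem.List.pyGetD cs (((k : Nat) : Int) - 1) ' ' = cs[k-1] := by
          have h : ((k : Nat) : Int) - 1 = ((k - 1 : Nat) : Int) := by omega
          rw [h, PySem.List.pyGetD_eq_getElem _ _ (by omega) (by simp; omega)]
          simp
        have hnd : ¬ (cs[k] = '.' ∧ cs[k-1] = '.') := by
          rintro ⟨h1, h0⟩
          exact hdots ((infix_dots_iff cs).2 ⟨k - 1, by omega,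
            by simpa [Nat.sub_add_cancel hkpos] using h0,
            by simpa [Nat.sub_add_cancel hkpos] using h1⟩)
        simp only [e, e0]
        rcases hd : cs[k] == '.' with _ | _
        · simp only [beq_eq_false_iff_ne] at hd
          simp [hd]
          simpa [hd] using hvk
        · have h1 : cs[k] = '.' := by simpa using hd
          have h0 : cs[k-1] ≠ '.' := fun h => hnd ⟨h1, h⟩
          simp [h1, Ne.symm h0]

-- B-side: a structural description of PySem.Chars.splitOn on the separator ['.'].
def splitD (pre : List Char) : List Char → List (List Char)
  | [] => [pre]
  | c :: r => if c = '.' then pre :: splitD [] r else splitD (pre ++ [c]) r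

theorem go_spec (l : List Char) : ∀ (fuel : Nat) (cur : List Char) (acc : List (List Char)),
    l.length < fuel →
    PySem.Chars.splitOn.go ['.'] fuel l cur acc = acc.reverse ++ splitD cur.reverse l := by
  induction l with
  | nil =>
    intro fuel cur acc h
    match fuel, h with
    | f+1, _ => simp [PySem.Chars.splitOn.go, splitD]
  | cons c r ih =>
    intro fuel cur acc h
    match fuel, h with
    | f+1, h =>
      rw [PySem.Chars.splitOn.go]
      by_cases hc : c = '.'
      · subst hc
        have hp : List.isPrefixOf ['.'] ('.' :: r) = true := by simp [List.isPrefixOf]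
        rw [if_pos hp, show List.drop (['.'] : List Char).length ('.' :: r) = r from rfl,
          ih f [] (cur.reverse :: acc) (by simpa using Nat.lt_of_succ_lt_succ h)]
        simp [splitD]
      · have hp : List.isPrefixOf ['.'] (c :: r) = false := by
          simp [List.isPrefixOf]; exact fun hh => hc hh.symm
        rw [if_neg (by simp [hp])]
        rw [ih f (c :: cur) acc (by simpa using Nat.lt_of_succ_lt_succ h)]
        simp [splitD, hc]

theorem splitOn_eq (cs : List Char) : PySem.Chars.splitOn cs ['.'] = splitD [] cs := by
  rw [PySem.Chars.splitOn, go_spec cs (cs.length + 1) [] [] (by omega)]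
  simp

-- The state machine equivalent to "all '.'-separated tokens are nonempty alnum words":
-- the flag says whether we are mid-token (have read at least one alnum char since the last dot).
def flagOk : Bool → List Char → Bool
  | inSeg, [] => inSeg
  | inSeg, c :: r => if c = '.' then inSeg && flagOk false r else PySem.Chars.isalnum c && flagOk true r

theorem flagOk_nil (b : Bool) : flagOk b [] = b := rfl
theorem flagOk_cons_dot (b : Bool) (r : List Char) :
    flagOk b ('.' :: r) = (b && flagOk false r) := by simp [flagOk]
theorem flagOk_cons (b : Bool) (c : Char) (r : List Char) (hc : c ≠ '.') :
    flagOk b (c :: r) = (PySem.Chars.isalnum c && flagOk true r) := by simp [flagOk, hc]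

theorem splitD_eq_flagOk (l : List Char) : ∀ pre : List Char,
    (splitD pre l).all (fun part => PySem.Chars.strIsalnum part)
      = (if pre = [] then flagOk false l else pre.all PySem.Chars.isalnum && flagOk true l) := by
  induction l with
  | nil =>
    intro pre
    rcases pre with _ | ⟨p, pr⟩ <;> simp [splitD, flagOk_nil, PySem.Chars.strIsalnum]
  | cons c r ih =>
    intro pre
    by_cases hc : c = '.'
    · subst hc
      have h0 := ih []
      rw [if_pos rfl] at h0
      rcases pre with _ | ⟨p, pr⟩
      · simp [splitD, flagOk_cons_dot, PySem.Chars.strIsalnum]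
      · rw [splitD, if_pos rfl, List.all_cons, h0]
        simp [flagOk_cons_dot, PySem.Chars.strIsalnum, Bool.and_assoc]
    · have h1 := ih (pre ++ [c])
      rw [if_neg (by simp)] at h1
      rcases pre with _ | ⟨p, pr⟩
      · simpa [splitD, hc, flagOk_cons _ _ _ hc] using h1
      · rw [splitD, if_neg hc, h1, if_neg (by simp), flagOk_cons _ _ _ hc]
        simp [Bool.and_assoc, Bool.and_comm, Bool.and_left_comm]

-- Prop forms of the two flag states.
def Mp (l : List Char) : Prop :=
  (∀ c ∈ l, PySem.Chars.isalnum c = true ∨ c = '.') ∧ ¬ ['.', '.'] <:+: l ∧ l.getLast? ≠ some '.'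
def Sp (l : List Char) : Prop := Mp l ∧ ∃ c r, l = c :: r ∧ PySem.Chars.isalnum c = true

theorem dot_not_alnum : PySem.Chars.isalnum '.' = false := by decide

theorem infix_dd_cons (c : Char) (r : List Char) :
    ['.', '.'] <:+: (c :: r) ↔ (c = '.' ∧ ∃ r', r = '.' :: r') ∨ ['.', '.'] <:+: r := by
  rw [List.infix_cons_iff, prefix_two_iff]
  constructor
  · rintro (⟨u, hu⟩ | h)
    · injection hu with h1 h2
      exact Or.inl ⟨h1, u, h2⟩
    · exact Or.inr h
  · rintro (⟨rfl, r', rfl⟩ | h)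
    · exact Or.inl ⟨r', rfl⟩
    · exact Or.inr h

theorem flagOk_char (l : List Char) :
    (flagOk true l = true ↔ Mp l) ∧ (flagOk false l = true ↔ Sp l) := by
  induction l with
  | nil =>
    constructor
    · simp [flagOk_nil, Mp]
    · simp [flagOk_nil, Sp]
  | cons c r ih =>
    by_cases hc : c = '.'
    · subst hc
      have hM : flagOk true ('.' :: r) = true ↔ Mp ('.' :: r) := by
        rw [flagOk_cons_dot, Bool.true_and, ih.2]
        constructor
        · rintro ⟨⟨hv, hni, hlast⟩, d, r', rfl, hd⟩
          refine ⟨fun x hx => ?_, ?_, ?_⟩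
          · rcases List.mem_cons.1 hx with rfl | hx
            · exact Or.inr rfl
            · exact hv x hx
          · rw [infix_dd_cons]
            rintro (⟨-, r₂, heq⟩ | hin)
            · injection heq with h1 h2
              rw [h1, dot_not_alnum] at hd
              exact absurd hd (by simp)
            · exact hni hin
          · rwa [List.getLast?_cons_cons]
        · rintro ⟨hv, hni, hlast⟩
          rw [infix_dd_cons] at hni
          rcases r with _ | ⟨d, r'⟩
          · simp at hlast
          · have hd : PySem.Chars.isalnum d = true := by
              rcases hv d (by simp) with h | rfl
              · exact h
              · exact absurd (Or.inl ⟨rfl, r', rfl⟩) hni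
            refine ⟨⟨fun x hx => hv x (List.mem_cons_of_mem _ hx),
              fun hin => hni (Or.inr hin), ?_⟩, d, r', rfl, hd⟩
            rwa [List.getLast?_cons_cons] at hlast
      refine ⟨hM, ?_⟩
      rw [flagOk_cons_dot, Bool.false_and]
      constructor
      · intro h; exact absurd h (by simp)
      · rintro ⟨-, c', r'', heq, halnum⟩
        injection heq with h1 h2
        rw [← h1, dot_not_alnum] at halnum
        exact absurd halnum (by simp)
    · have hMp : (PySem.Chars.isalnum c = true ∧ Mp r) ↔ Mp (c :: r) := by
        constructor
        · rintro ⟨ha, hv, hni, hlast⟩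
          refine ⟨fun x hx => ?_, ?_, ?_⟩
          · rcases List.mem_cons.1 hx with rfl | hx
            · exact Or.inl ha
            · exact hv x hx
          · rw [infix_dd_cons]
            rintro (⟨h1, -⟩ | hin)
            · exact hc h1
            · exact hni hin
          · rcases r with _ | ⟨d, r'⟩
            · simp only [List.getLast?_singleton, ne_eq, Option.some.injEq]
              intro h1
              rw [h1, dot_not_alnum] at ha
              exact absurd ha (by simp)
            · rwa [List.getLast?_cons_cons]
        · rintro ⟨hv, hni, hlast⟩
          rw [infix_dd_cons] at hni
          have ha : PySem.Chars.isalnum c = true := by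
            rcases hv c (by simp) with h | rfl
            · exact h
            · exact absurd rfl hc
          refine ⟨ha, fun x hx => hv x (List.mem_cons_of_mem _ hx),
            fun hin => hni (Or.inr hin), ?_⟩
          rcases r with _ | ⟨d, r'⟩
          · simp
          · rwa [List.getLast?_cons_cons] at hlast
      have hM : flagOk true (c :: r) = true ↔ Mp (c :: r) := by
        rw [flagOk_cons _ _ _ hc, Bool.and_eq_true, ih.1]
        exact hMp
      refine ⟨hM, ?_⟩
      rw [flagOk_cons _ _ _ hc, Bool.and_eq_true, ih.1]
      constructor
      · rintro ⟨ha, hm⟩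
        exact ⟨hMp.1 ⟨ha, hm⟩, c, r, rfl, ha⟩
      · rintro ⟨hmp, c', r'', heq, halnum⟩
        injection heq with h1 h2
        rw [← h1] at halnum
        exact ⟨halnum, (hMp.2 hmp).2⟩

-- Python endpoint accesses on a nonempty list.
theorem pyGetD_head (c : Char) (r : List Char) :
    PySem.List.pyGetD (c :: r) (0 : Int) ' ' = c := by
  simp [PySem.List.pyGetD, PySem.List.pyGet?, PySem.List.pyIdx?]

theorem pyGetD_last (cs : List Char) (h : cs ≠ []) :
    PySem.List.pyGetD cs (-1 : Int) ' ' = cs.getLast h := by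
  have hl : 0 < cs.length := List.length_pos_iff.2 h
  simp only [PySem.List.pyGetD, PySem.List.pyGet?, PySem.List.pyIdx?]
  rw [if_neg (by omega : ¬ (0 : Int) ≤ -1), if_pos (by omega : -(cs.length : Int) ≤ -1)]
  have h1 : ((-(-1 : Int)).toNat) = 1 := rfl
  rw [h1]
  simp [List.getLast_eq_getElem,
    List.getElem?_eq_getElem (show cs.length - 1 < cs.length by omega)]

-- ===== VERDICT (by name: the statement is the Claim_ definition above) =====
theorem valid_url_py_spec : Claim_equal_valid_url_py := by
  intro s _dom pre
  unfold Spec_valid_url_py valid_url_py valid_url_py_alt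
  have hne : s.toList ≠ [] := fun h => pre (String.toList_eq_nil_iff.mp h)
  obtain ⟨c, r, hcr⟩ : ∃ c r, s.toList = c :: r := by
    rcases hl : s.toList with _ | ⟨c, r⟩
    · exact absurd hl hne
    · exact ⟨c, r, rfl⟩
  rw [loop_range_eq, splitOn_eq, splitD_eq_flagOk, if_pos rfl]
  rw [Bool.eq_iff_iff, (flagOk_char s.toList).2]
  constructor
  · intro h
    split_ifs at h with hg
    rw [Bool.not_eq_true, Bool.or_eq_false_iff] at hg
    obtain ⟨ha0, hb0⟩ := hg
    rw [Bool.not_eq_false'] at ha0 hb0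
    rw [Bool.and_eq_true, Bool.not_eq_true', List.all_eq_true] at h
    obtain ⟨hni, hv⟩ := h
    have hvp : ∀ x ∈ s.toList, PySem.Chars.isalnum x = true ∨ x = '.' := by
      intro x hx
      have := hv x hx
      simpa using this
    have hni' : ¬ ['.', '.'] <:+: s.toList := (PySem.Chars.isIn_eq_false_iff _ _).1 hni
    refine ⟨⟨hvp, hni', ?_⟩, ?_⟩
    · rw [List.getLast?_eq_some_getLast hne]
      intro hlast
      rw [pyGetD_last s.toList hne,
        show s.toList.getLast hne = '.' from by injection hlast, dot_not_alnum] at hb0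
      exact absurd hb0 (by simp)
    · refine ⟨c, r, hcr, ?_⟩
      rw [hcr, pyGetD_head] at ha0
      exact ha0
  · rintro ⟨⟨hvp, hni, hlast⟩, c', r', heq, halnum⟩
    have hhead : PySem.Chars.isalnum (PySem.List.pyGetD s.toList (0 : Int) ' ') = true := by
      rw [heq, pyGetD_head]; exact halnum
    have hlastal : PySem.Chars.isalnum (PySem.List.pyGetD s.toList (-1 : Int) ' ') = true := by
      rw [pyGetD_last s.toList hne]
      rcases hvp _ (List.getLast_mem hne) with h | h
      · exact h
      · rw [List.getLast?_eq_some_getLast hne] at hlast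
        exact absurd (by rw [h]) hlast
    rw [if_neg (by simp [hhead, hlastal])]
    rw [Bool.and_eq_true, Bool.not_eq_true', List.all_eq_true]
    refine ⟨(PySem.Chars.isIn_eq_false_iff _ _).2 hni, fun x hx => ?_⟩
    rcases hvp x hx with h | h
    · simp [h]
    · simp [h]

@[simp] theorem valid_url_py_raises : Claim_raises_valid_url_py := by
  unfold Claim_raises_valid_url_py
  exact ⟨fun s _ hr => by simp [Pre_valid_url_py, Raises_valid_url_py] at hr ⊢; exact hr, by decide⟩
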